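-- pv_equiv track=rewrite | github.com/rafa12qw/AlgoTP | TP1/TP1Exo2.py | eltMajDet
-- ===== SOURCE A (Python) =====
-- def eltMajDet(T):
--     n = len(T)
--     m = n // 2
--
--     for i in range(n):
--         cpt = 0
--         for j in range(i+1,n):
--             if T[i] == T[j]:
--                 cpt += 1
--         if cpt == m:
--             return T[i]
--     return -1
-- ===== SOURCE B (Python) =====
-- def eltMajDet(T):
--     m = len(T) // 2
--     total = {}
--     for x in T:
--         total[x] = total.get(x, 0) + 1
--     seen = {}
--     for x in T:
--         if total[x] - seen.get(x, 0) - 1 == m: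
--             return x
--         seen[x] = seen.get(x, 0) + 1
--     return -1
-- ===== Notes on version B (the rewrite author's own statement) =====
-- stated objective: faster
-- what changed: Replaces the quadratic nested index scan with a hash map of total counts plus one pass tracking already-seen occurrences, so the number of later duplicates of each element is computed in O(1).
import Mathlib
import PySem

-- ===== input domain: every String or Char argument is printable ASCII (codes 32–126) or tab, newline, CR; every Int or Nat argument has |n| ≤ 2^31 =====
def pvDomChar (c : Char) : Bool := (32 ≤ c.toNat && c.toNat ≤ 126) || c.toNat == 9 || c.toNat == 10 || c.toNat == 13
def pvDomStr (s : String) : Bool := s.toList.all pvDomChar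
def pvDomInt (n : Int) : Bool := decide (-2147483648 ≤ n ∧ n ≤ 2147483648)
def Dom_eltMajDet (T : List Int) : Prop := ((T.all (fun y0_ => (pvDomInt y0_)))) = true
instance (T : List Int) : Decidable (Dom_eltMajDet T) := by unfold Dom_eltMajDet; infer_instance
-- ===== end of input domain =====

-- B replaces A's quadratic nested index scan by a hash map of total counts plus one
-- pass tracking already-seen occurrences (objective: faster, asymptotic O(n) vs O(n^2)).

-- ===== PORT A =====
-- inner loop: cpt = number of j in range(i+1, n) with T[i] == T[j]
def eltMajDetCnt (T : List Int) (n i : Int) : Int :=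
  (PySem.List.pyRange (i + 1) n).foldl
    (fun cpt j => if PySem.List.pyGetD T i 0 = PySem.List.pyGetD T j 0 then cpt + 1 else cpt) 0

-- outer loop over the indices of range(n), with early return
def eltMajDetGo (T : List Int) (n m : Int) : List Int → Int
  | [] => -1
  | i :: rest =>
      if eltMajDetCnt T n i = m then PySem.List.pyGetD T i 0 else eltMajDetGo T n m rest

def eltMajDet (T : List Int) : Int :=
  let n : Int := PySem.List.len T
  let m : Int := PySem.Int.floordiv n 2
  eltMajDetGo T n m (PySem.List.pyRange 0 n)

-- ===== PORT B =====
-- second loop of Source B: for x in T, return x when total[x] - seen.get(x,0) - 1 == m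
def eltMajDetScan (total : PySem.Dict Int Int) (m : Int) : PySem.Dict Int Int → List Int → Int
  | _, [] => -1
  | seen, x :: rest =>
      if total.getD x 0 - seen.getD x 0 - 1 = m then x
      else eltMajDetScan total m (seen.insert x (seen.getD x 0 + 1)) rest

def eltMajDet_alt (T : List Int) : Int :=
  let m : Int := PySem.Int.floordiv (PySem.List.len T) 2
  -- total[x] = total.get(x, 0) + 1
  let total : PySem.Dict Int Int :=
    T.foldl (fun d x => d.modify x 0 (fun v => v + 1)) PySem.Dict.empty
  eltMajDetScan total m PySem.Dict.empty T

-- ===== PRECONDITION & SPEC =====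
def Spec_eltMajDet (T : List Int) (out : Int) : Prop := out = eltMajDet_alt T
instance (T : List Int) (out : Int) : Decidable (Spec_eltMajDet T out) := by unfold Spec_eltMajDet; infer_instance

-- ===== CLAIM (what is proved, stated in full; the proofs are below) =====
def Claim_equal_eltMajDet : Prop := ∀ (T : List Int), Dom_eltMajDet T → Spec_eltMajDet T (eltMajDet T)

-- ===== LEMMAS AND PROOFS =====

-- common reference: first x whose later-duplicate count equals m, else -1
def pvSpecAux (m : Int) : List Int → Int
  | [] => -1
  | x :: xs => if (xs.count x : Int) = m then x else pvSpecAux m xs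

lemma pv_scan_eq_spec (total : PySem.Dict Int Int) (m : Int) :
    ∀ (rest : List Int) (seen : PySem.Dict Int Int),
    (∀ x ∈ rest, total.getD x 0 - seen.getD x 0 = (rest.count x : Int)) →
    eltMajDetScan total m seen rest = pvSpecAux m rest := by
  intro rest
  induction rest with
  | nil => intro seen _; rfl
  | cons x tail ih =>
    intro seen H
    have hx := H x (List.mem_cons_self ..)
    rw [List.count_cons] at hx
    simp only [BEq.rfl, if_true] at hx
    simp only [eltMajDetScan, pvSpecAux]
    by_cases hc : (tail.count x : Int) = m
    · rw [if_pos (by push_cast at hx ⊢; omega), if_pos hc]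
    · rw [if_neg (by push_cast at hx ⊢; omega), if_neg hc]
      apply ih
      intro y hy
      rw [PySem.Dict.getD_insert]
      by_cases hxy : y = x
      · subst hxy
        have := H y (List.mem_cons_of_mem _ hy)
        rw [List.count_cons] at this
        simp only [BEq.rfl, if_true] at this
        rw [if_pos rfl]
        push_cast at this ⊢; omega
      · rw [if_neg hxy]
        have := H y (List.mem_cons_of_mem _ hy)
        rw [List.count_cons] at this
        rw [if_neg (by simpa using fun h => hxy h.symm)] at this
        omega

lemma pv_alt_eq_spec (T : List Int) :
    eltMajDet_alt T = pvSpecAux (PySem.Int.floordiv (T.length : Int) 2) T := by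
  unfold eltMajDet_alt
  have hlen : PySem.List.len T = (T.length : Int) := by simp [pysem]
  rw [hlen]
  apply pv_scan_eq_spec
  intro x _
  rw [PySem.Dict.getD_foldl_modify_add_one]
  simp [PySem.Dict.getD, PySem.Dict.empty, PySem.Dict.get?]

lemma pv_cnt_eq (T : List Int) (k : Nat) (hk : k < T.length) :
    eltMajDetCnt T (T.length : Int) (k : Int) = ((T.drop (k + 1)).count T[k] : Int) := by
  unfold eltMajDetCnt
  have hfun : (fun (cpt j : Int) =>
      if PySem.List.pyGetD T (k : Int) 0 = PySem.List.pyGetD T j 0 then cpt + 1 else cpt)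
      = (fun cpt j =>
      if (decide (PySem.List.pyGetD T (k : Int) 0 = PySem.List.pyGetD T j 0)) = true
        then cpt + 1 else cpt) := by
    funext cpt j; simp
  rw [hfun, PySem.List.foldl_count_if, zero_add]
  have hget : PySem.List.pyGetD T (k : Int) 0 = T[k] := by
    rw [PySem.List.pyGetD_natCast, List.getD_eq_getElem _ _ hk]
  rw [hget]
  have main : ∀ (d j : Nat), T.length = j + d →
      List.countP (fun i => decide (T[k]'hk = PySem.List.pyGetD T i 0))
        (PySem.List.pyRange (j : Int) (T.length : Int))
      = (T.drop j).count T[k] := by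
    intro d
    induction d with
    | zero =>
      intro j h
      have h1 : PySem.List.pyRange (j : Int) (T.length : Int) = [] := by
        simp [pysem, show (T.length : Int) ≤ (j : Int) by exact_mod_cast Nat.le_of_eq (by omega : T.length = j)]
      rw [h1, List.drop_eq_nil_of_le (by omega)]
      rfl
    | succ d ih =>
      intro j h
      have hj : j < T.length := by omega
      rw [PySem.List.pyRange_one_cons (by exact_mod_cast hj), List.countP_cons]
      rw [List.drop_eq_getElem_cons hj, List.count_cons]
      have hgj : PySem.List.pyGetD T (j : Int) 0 = T[j] := by
        rw [PySem.List.pyGetD_natCast, List.getD_eq_getElem _ _ hj]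
      have hcast : ((j : Int) + 1) = ((j + 1 : Nat) : Int) := by push_cast; ring
      rw [hcast, ih (j + 1) (by omega)]
      rw [hgj]
      by_cases he : T[j] = T[k]
      · simp [he]
      · simp [he]
        exact fun hh => he (Eq.symm hh)
  have hc1 : ((k : Int) + 1) = ((k + 1 : Nat) : Int) := by push_cast; ring
  rw [hc1, main (T.length - (k + 1)) (k + 1) (by omega)]

lemma pv_go_eq_spec (T : List Int) (m : Int) :
    ∀ (d j : Nat), T.length = j + d →
    eltMajDetGo T (T.length : Int) m (PySem.List.pyRange (j : Int) (T.length : Int))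
      = pvSpecAux m (T.drop j) := by
  intro d
  induction d with
  | zero =>
    intro j h
    have h1 : PySem.List.pyRange (j : Int) (T.length : Int) = [] := by
      simp [pysem, show (T.length : Int) ≤ (j : Int) by exact_mod_cast Nat.le_of_eq (by omega : T.length = j)]
    rw [h1, List.drop_eq_nil_of_le (by omega)]
    rfl
  | succ d ih =>
    intro j h
    have hj : j < T.length := by omega
    rw [PySem.List.pyRange_one_cons (by exact_mod_cast hj)]
    rw [List.drop_eq_getElem_cons hj]
    simp only [eltMajDetGo, pvSpecAux]
    rw [pv_cnt_eq T j hj]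
    have hgj : PySem.List.pyGetD T (j : Int) 0 = T[j] := by
      rw [PySem.List.pyGetD_natCast, List.getD_eq_getElem _ _ hj]
    rw [hgj]
    have hcast : ((j : Int) + 1) = ((j + 1 : Nat) : Int) := by push_cast; ring
    rw [hcast, ih (j + 1) (by omega)]

-- ===== VERDICT (by name: the statement is the Claim_ definition above) =====
theorem eltMajDet_spec : Claim_equal_eltMajDet := by
  intro T _
  unfold Spec_eltMajDet
  unfold eltMajDet
  have hlen : PySem.List.len T = (T.length : Int) := by simp [pysem]
  rw [hlen, pv_alt_eq_spec]
  have h0 : (0 : Int) = ((0 : Nat) : Int) := rfl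
  rw [h0, pv_go_eq_spec T _ T.length 0 (by omega), List.drop_zero]
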